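-- pv_equiv track=rewrite | github.com/Omer-Demirtas/NotePad | proje 1.py | cift_tek
-- ===== SOURCE A (Python) =====
-- def cift_tek(rakam):
--     tek = [1,3,5,7,9]
--     cift = [0,2,4,6,8]
--
--     basamak_sayisi =len(str(rakam))
--     son_basamak = str(rakam)[basamak_sayisi - 1:basamak_sayisi]
--     for x in tek :
--         if int(x) == int(son_basamak) :
--             return 'tek'
--         else:
--             pass
--     return 'cift'
-- ===== SOURCE B (Python) =====
-- def cift_tek(rakam):
--     return 'tek' if rakam % 2 else 'cift'
-- ===== Notes on version B (the rewrite author's own statement) =====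
-- stated objective: simpler
-- what changed: Replaced the string-slicing of the last digit and the membership loop over the odd-digit list with a single integer parity test (rakam % 2).
import Mathlib
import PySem

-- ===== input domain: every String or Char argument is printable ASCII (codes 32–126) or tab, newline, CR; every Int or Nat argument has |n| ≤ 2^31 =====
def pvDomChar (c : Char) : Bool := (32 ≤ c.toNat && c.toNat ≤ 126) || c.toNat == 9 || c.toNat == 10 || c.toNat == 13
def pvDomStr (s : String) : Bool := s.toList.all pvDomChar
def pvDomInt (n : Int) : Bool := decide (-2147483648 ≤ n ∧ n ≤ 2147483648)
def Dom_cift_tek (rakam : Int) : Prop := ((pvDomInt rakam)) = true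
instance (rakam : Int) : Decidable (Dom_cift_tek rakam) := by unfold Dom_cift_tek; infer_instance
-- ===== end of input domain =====

-- B replaces A's string-slice of the last digit and membership loop over the odd-digit
-- list with a single integer parity test (simpler; same values on all ints).


-- ===== PORT A =====
-- the 'for x in tek: if int(x) == int(son_basamak): return "tek"' loop
def cift_tek_loop (v : Int) : List Int → String
  | [] => "cift"
  | x :: xs => if x = v then "tek" else cift_tek_loop v xs

def cift_tek (rakam : Int) : String :=
  let tek : List Int := [1, 3, 5, 7, 9]
  let s := PySem.Int.toChars rakam                 -- str(rakam) as its character list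
  let basamak_sayisi : Int := s.length             -- len(str(rakam))
  let son_basamak := PySem.List.slice s (some (basamak_sayisi - 1)) (some basamak_sayisi)
  match PySem.Int.ofChars? son_basamak with        -- int(son_basamak); never a ValueError for an int argument
  | none => ""                                     -- unreachable: str(rakam) always ends in a digit
  | some v => cift_tek_loop v tek

-- ===== PORT B =====
def cift_tek_alt (rakam : Int) : String :=
  if PySem.Int.mod rakam 2 ≠ 0 then "tek" else "cift"

-- ===== PRECONDITION & SPEC =====
def Spec_cift_tek (rakam : Int) (out : String) : Prop := out = cift_tek_alt rakam
instance (rakam : Int) (out : String) : Decidable (Spec_cift_tek rakam out) := by unfold Spec_cift_tek; infer_instance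

-- ===== CLAIM (what is proved, stated in full; the proofs are below) =====
def Claim_equal_cift_tek : Prop := ∀ (rakam : Int), Dom_cift_tek rakam → Spec_cift_tek rakam (cift_tek rakam)

-- ===== LEMMAS AND PROOFS =====

-- the accumulator of Nat.toDigitsCore keeps its last element
lemma toDigitsCore_getLast? (f : Nat) : ∀ (n : Nat) (ds : List Char) (d : Char),
    (Nat.toDigitsCore 10 f n (ds ++ [d])).getLast? = some d := by
  induction f with
  | zero => intro n ds d; simp [Nat.toDigitsCore]
  | succ f ih =>
    intro n ds d
    simp only [Nat.toDigitsCore]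
    split
    · exact (List.getLast?_concat (l := (n % 10).digitChar :: ds))
    · exact ih (n / 10) ((n % 10).digitChar :: ds) d

lemma toDigits_getLast? (n : Nat) :
    (Nat.toDigits 10 n).getLast? = some (Nat.digitChar (n % 10)) := by
  simp only [Nat.toDigits, Nat.toDigitsCore]
  split
  · rfl
  · exact toDigitsCore_getLast? n (n / 10) [] _

lemma toChars_getLast? (rakam : Int) :
    (PySem.Int.toChars rakam).getLast? = some (Nat.digitChar (rakam.natAbs % 10)) := by
  unfold PySem.Int.toChars
  split
  · rename_i h
    have hnil : Nat.toDigits 10 rakam.natAbs ≠ [] := by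
      intro hnil
      have := toDigits_getLast? rakam.natAbs
      rw [hnil] at this; simp at this
    cases hcase : Nat.toDigits 10 rakam.natAbs with
    | nil => exact absurd hcase hnil
    | cons b t =>
      rw [List.getLast?_cons_cons, ← hcase, toDigits_getLast?]
  · rename_i h
    have : rakam.toNat = rakam.natAbs := by omega
    rw [this, toDigits_getLast?]

lemma digit_ofChars? (d : Nat) (hd : d < 10) :
    PySem.Int.ofChars? [Nat.digitChar d] = some (d : Int) := by
  interval_cases d <;> decide

theorem cift_tek_spec_aux (rakam : Int) : cift_tek rakam = cift_tek_alt rakam := by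
  have hne : PySem.Int.toChars rakam ≠ [] := by
    intro h
    have := toChars_getLast? rakam
    rw [h] at this; simp at this
  set s := PySem.Int.toChars rakam with hs
  have hlen : 1 ≤ s.length := List.length_pos_iff.mpr hne
  have hslice : PySem.List.slice s (some ((s.length : Int) - 1)) (some (s.length : Int))
      = [s.getLast hne] := by
    have h1 : ((s.length : Int) - 1) = ((s.length - 1 : Nat) : Int) := by omega
    have h2 : ((s.length : Int)) = ((s.length : Nat) : Int) := by norm_num
    rw [h1, h2, PySem.List.slice_natCast, List.drop_length_sub_one hne]
    have h3 : s.length - (s.length - 1) = 1 := by omega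
    rw [h3]; rfl
  have hlast : s.getLast hne = Nat.digitChar (rakam.natAbs % 10) := by
    have := toChars_getLast? rakam
    rw [← hs, List.getLast?_eq_some_getLast hne] at this
    exact Option.some.inj this
  have hmod : rakam.natAbs % 10 < 10 := Nat.mod_lt _ (by norm_num)
  unfold cift_tek
  simp only [← hs, hslice, hlast, digit_ofChars? _ hmod]
  unfold cift_tek_alt
  rw [PySem.Int.mod_eq_emod_of_pos (by norm_num : (0:Int) < 2)]
  set d := rakam.natAbs % 10 with hd
  have hpar : rakam % 2 = 0 ↔ d % 2 = 0 := by omega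
  interval_cases d <;> norm_num [cift_tek_loop] <;> intro h <;> exact absurd h (by omega)

-- ===== VERDICT (by name: the statement is the Claim_ definition above) =====
theorem cift_tek_spec : Claim_equal_cift_tek := by
  intro rakam _
  exact cift_tek_spec_aux rakam
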